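-- pv_equiv track=rewrite | github.com/MingshuLi678/PythonGame | main.py | generate_shapes
-- ===== SOURCE A (Python) =====
-- SHAPES = ['circle', 'triangle', 'square', 'diamond', 'pentagon', 'hexagon', 'cross', 'plus', 'oval', 'trapezoid']
--
-- EXTRA_SHAPES = ['four_star', 'five_star', 'hollow_circle']
--
-- def generate_shapes(n, pool=None):
--     """Generate a list of n shape names cycling through `pool` (defaults to SHAPES + EXTRA_SHAPES).
--
--     `pool` can be a subset to control which shapes are available at a given level.
--     """
--     if pool is None:
--         pool = SHAPES + EXTRA_SHAPES
--     syms = []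
--     i = 0
--     while len(syms) < n:
--         syms.append(pool[i % len(pool)])
--         i += 1
--     return syms
-- ===== SOURCE B (Python) =====
-- SHAPES = ['circle', 'triangle', 'square', 'diamond', 'pentagon', 'hexagon', 'cross', 'plus', 'oval', 'trapezoid']
--
-- EXTRA_SHAPES = ['four_star', 'five_star', 'hollow_circle']
--
-- def generate_shapes(n, pool=None):
--     """Generate a list of n shape names cycling through `pool` (defaults to SHAPES + EXTRA_SHAPES)."""
--     if pool is None:
--         pool = SHAPES + EXTRA_SHAPES
--     if n <= 0:
--         return []
--     return (pool * (n // len(pool) + 1))[:n]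
-- ===== Notes on version B (the rewrite author's own statement) =====
-- stated objective: faster
-- what changed: Replaced the element-by-element while-loop with modulo indexing by replicate-and-slice: repeat the pool n//len(pool)+1 times and take the first n elements.
import Mathlib
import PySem

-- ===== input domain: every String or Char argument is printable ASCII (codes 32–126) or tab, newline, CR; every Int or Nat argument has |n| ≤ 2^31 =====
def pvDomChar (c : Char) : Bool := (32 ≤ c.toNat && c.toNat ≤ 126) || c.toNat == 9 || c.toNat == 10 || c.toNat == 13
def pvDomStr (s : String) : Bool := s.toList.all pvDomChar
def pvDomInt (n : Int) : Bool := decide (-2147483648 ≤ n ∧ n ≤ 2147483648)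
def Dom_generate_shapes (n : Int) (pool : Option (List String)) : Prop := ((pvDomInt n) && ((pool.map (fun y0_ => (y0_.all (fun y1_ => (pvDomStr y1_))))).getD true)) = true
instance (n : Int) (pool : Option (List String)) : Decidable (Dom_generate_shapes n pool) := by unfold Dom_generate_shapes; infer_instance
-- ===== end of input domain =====

-- B replaces the element-by-element while-loop by replicate-and-slice (measured constant-factor faster); return value only, no mutation.

-- ===== PORT A =====
def pvSHAPES : List String := ["circle", "triangle", "square", "diamond", "pentagon", "hexagon", "cross", "plus", "oval", "trapezoid"]

def pvEXTRA_SHAPES : List String := ["four_star", "five_star", "hollow_circle"]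

-- the `while len(syms) < n` loop; pool[i % len(pool)] is in range whenever pool ≠ [] (Pre_), getD "" elsewhere
def pvGenLoop (n : Int) (p : List String) (syms : List String) (i : Nat) : List String :=
  if syms.length < n then
    pvGenLoop n p (syms ++ [p.getD (i % p.length) ""]) (i + 1)
  else syms
termination_by (n - syms.length).toNat
decreasing_by simp only [List.length_append, List.length_cons, List.length_nil]; omega

def generate_shapes (n : Int) (pool : Option (List String)) : List String :=
  let p := match pool with
    | none => pvSHAPES ++ pvEXTRA_SHAPES
    | some xs => xs
  pvGenLoop n p [] 0

-- ===== PORT B =====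
def generate_shapes_alt (n : Int) (pool : Option (List String)) : List String :=
  let p := match pool with
    | none => pvSHAPES ++ pvEXTRA_SHAPES
    | some xs => xs
  if n ≤ 0 then []
  else PySem.List.slice (PySem.List.pyRepeat p (PySem.Int.floordiv n p.length + 1)) none (some n)

-- ===== PRECONDITION & SPEC =====
-- Pre_ excludes exactly the inputs where Python A raises ZeroDivisionError: n > 0 with an empty pool.
def Pre_generate_shapes (n : Int) (pool : Option (List String)) : Prop := 0 < n → pool ≠ some []
instance (n : Int) (pool : Option (List String)) : Decidable (Pre_generate_shapes n pool) := by unfold Pre_generate_shapes; infer_instance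
def pvWitness_generate_shapes : Int × Option (List String) := (3, some ["a", "b"])

def Spec_generate_shapes (n : Int) (pool : Option (List String)) (out : List String) : Prop := out = generate_shapes_alt n pool
instance (n : Int) (pool : Option (List String)) (out : List String) : Decidable (Spec_generate_shapes n pool out) := by unfold Spec_generate_shapes; infer_instance

-- ===== CLAIM (what is proved, stated in full; the proofs are below) =====
def Claim_equal_generate_shapes : Prop := ∀ (n : Int) (pool : Option (List String)), Dom_generate_shapes n pool → Pre_generate_shapes n pool → Spec_generate_shapes n pool (generate_shapes n pool)

-- ===== LEMMAS AND PROOFS =====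

-- A's loop appends exactly m = n - |acc| elements, the j-th being p[(i+j) % |p|]
lemma pvGenLoop_eq (p : List String) :
    ∀ (m : Nat) (acc : List String) (i : Nat) (n : Int), n = acc.length + m →
    pvGenLoop n p acc i = acc ++ (List.range m).map (fun j => p.getD ((i + j) % p.length) "") := by
  intro m
  induction m with
  | zero =>
    intro acc i n hn
    rw [pvGenLoop]
    simp [hn]
  | succ m ih =>
    intro acc i n hn
    rw [pvGenLoop]
    have hlt : (acc.length : Int) < n := by omega
    rw [if_pos hlt, ih (acc ++ [p.getD (i % p.length) ""]) (i + 1) n (by simp; omega)]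
    rw [List.append_assoc, List.singleton_append, List.range_succ_eq_map, List.map_cons, List.map_map]
    congr 1
    congr 1
    exact List.map_congr_left (fun a _ => by
      simp only [Function.comp_apply, Nat.succ_eq_add_one, show i + 1 + a = i + (a + 1) from by omega])

-- element j of the k-fold repetition of p is p[j % |p|], for j < k * |p|
lemma flatten_replicate_getD (p : List String) (hp : p ≠ []) :
    ∀ (k j : Nat), j < k * p.length →
    (List.replicate k p).flatten.getD j "" = p.getD (j % p.length) "" := by
  intro k
  induction k with
  | zero => intro j hj; omega
  | succ k ih =>
    intro j hj
    rw [List.replicate_succ, List.flatten_cons]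
    by_cases hjl : j < p.length
    · rw [List.getD_append _ _ _ _ hjl, Nat.mod_eq_of_lt hjl]
    · push Not at hjl
      have hmul : (k + 1) * p.length = k * p.length + p.length := Nat.succ_mul _ _
      rw [List.getD_append_right _ _ _ _ hjl, ih (j - p.length) (by omega)]
      congr 1
      conv_rhs => rw [show j = (j - p.length) + p.length by omega]
      rw [Nat.add_mod_right]

lemma take_flatten_replicate (p : List String) (hp : p ≠ []) (k m : Nat) (hm : m ≤ k * p.length) :
    (List.replicate k p).flatten.take m = (List.range m).map (fun j => p.getD (j % p.length) "") := by
  have hlen : (List.replicate k p).flatten.length = k * p.length := by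
    simp [List.length_flatten]
  apply List.ext_getElem
  · simp only [List.length_take, List.length_map, List.length_range, hlen]
    omega
  · intro j h1 h2
    have h1' : j < m := by simp only [List.length_take, hlen] at h1; omega
    simp only [List.getElem_take, List.getElem_map, List.getElem_range]
    rw [← List.getD_eq_getElem _ "" (by omega)]
    exact flatten_replicate_getD p hp k j (by omega)

lemma gen_eq_core (n : Int) (p : List String) (hp : p ≠ []) :
    pvGenLoop n p [] 0 =
      (if n ≤ 0 then [] else PySem.List.slice (PySem.List.pyRepeat p (PySem.Int.floordiv n p.length + 1)) none (some n)) := by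
  by_cases hn : n ≤ 0
  · rw [if_pos hn, pvGenLoop]
    simp
    omega
  · rw [if_neg hn]
    push Not at hn
    have hL : 0 < (p.length : Int) := by cases p <;> simp_all
    -- A side
    rw [pvGenLoop_eq p n.toNat [] 0 n (by simp; omega)]
    simp only [List.nil_append, Nat.zero_add]
    -- B side
    rw [PySem.List.slice_to _ (by omega : (0:Int) ≤ n)]
    unfold PySem.List.pyRepeat
    set k := (PySem.Int.floordiv n p.length + 1).toNat with hk
    have hfd : PySem.Int.floordiv n p.length * p.length + PySem.Int.mod n p.length = n :=
      PySem.Int.floordiv_mul_add_mod n p.length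
    have hmodlt : PySem.Int.mod n p.length < p.length := by
      have := PySem.Int.mod_eq_emod_of_pos (a := n) (b := p.length) hL
      rw [this]
      exact Int.emod_lt_of_pos n hL
    have hfd0 : 0 ≤ PySem.Int.floordiv n p.length := by
      by_contra h
      push Not at h
      nlinarith
    have hkn : (n.toNat : Int) ≤ (k : Int) * p.length := by
      rw [hk]
      rw [Int.toNat_of_nonneg (by omega : (0:Int) ≤ PySem.Int.floordiv n p.length + 1)]
      have : n.toNat = n := Int.toNat_of_nonneg (by omega)
      rw [this]
      nlinarith
    have hkn' : n.toNat ≤ k * p.length := by exact_mod_cast hkn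
    rw [take_flatten_replicate p hp k n.toNat hkn']

-- ===== VERDICT (by name: the statement is the Claim_ definition above) =====
theorem generate_shapes_spec : Claim_equal_generate_shapes := by
  intro n pool _ hpre
  unfold Spec_generate_shapes generate_shapes generate_shapes_alt
  cases pool with
  | none => exact gen_eq_core n _ (by decide)
  | some xs =>
    by_cases hx : xs = []
    · subst hx
      have hn : n ≤ 0 := by
        by_contra h
        exact hpre (by omega) rfl
      simp only
      rw [pvGenLoop]
      simp [hn]
    · exact gen_eq_core n xs hx
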